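-- pv_equiv track=rewrite | github.com/DLBPointon/treeval-project-stats | src/treeval/scripts/parse_execution.py | remove_common_string
-- ===== SOURCE A (Python) =====
-- def remove_common_string(
--     smallest_process: list, process_list: list, process_count: int
-- ) -> list:
--     """
--     removes common str in each sublist if total number of str == total number of processes
--     (this avoids cases of large numbers of repeat processes getting trunctated)
--
--     THIS DOES KEEP ORDER WITH THE DATAFRAME
--     """
--     remove_list = []
--     flat_list = [ii for i in process_list for ii in i]
--
--     if process_count != 1:
--         for i in set(flat_list):
--             if flat_list.count(i) == process_count:
--                 remove_list.append(i)
--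
--     return [
--         ":".join([ii for ii in i if not ii in remove_list]) for i in process_list
--     ]  # Nested list comprehension! Doge Wow!
-- ===== SOURCE B (Python) =====
-- def remove_common_string(smallest_process, process_list, process_count):
--     # Sort the flattened list so equal strings are adjacent, then scan runs:
--     # a run whose length equals process_count marks its value for removal.
--     flat = sorted([s for sub in process_list for s in sub])
--     remove = set()
--     if process_count != 1:
--         i, n = 0, len(flat)
--         while i < n:
--             j = i + 1
--             while j < n and flat[j] == flat[i]:
--                 j += 1
--             if j - i == process_count:
--                 remove.add(flat[i])
--             i = j
--     return [":".join([s for s in sub if s not in remove]) for sub in process_list]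
-- ===== Notes on version B (the rewrite author's own statement) =====
-- stated objective: faster
-- what changed: Instead of A's set(flat_list) pass with a repeated flat_list.count inner scan, B sorts the flattened list once and scans adjacent runs, marking values whose run length equals process_count.
import Mathlib
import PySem

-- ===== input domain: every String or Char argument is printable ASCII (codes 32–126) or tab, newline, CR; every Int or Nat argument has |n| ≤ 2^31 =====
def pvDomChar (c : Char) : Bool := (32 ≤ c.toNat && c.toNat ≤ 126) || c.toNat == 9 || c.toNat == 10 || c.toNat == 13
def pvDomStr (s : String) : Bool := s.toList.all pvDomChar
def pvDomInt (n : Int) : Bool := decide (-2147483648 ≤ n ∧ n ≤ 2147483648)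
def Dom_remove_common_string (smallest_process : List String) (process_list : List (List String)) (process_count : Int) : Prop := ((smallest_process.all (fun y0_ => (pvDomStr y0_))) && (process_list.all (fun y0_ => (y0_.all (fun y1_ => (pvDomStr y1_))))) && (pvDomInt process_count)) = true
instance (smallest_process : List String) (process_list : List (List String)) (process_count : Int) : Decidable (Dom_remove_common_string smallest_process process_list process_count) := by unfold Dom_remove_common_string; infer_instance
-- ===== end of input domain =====

-- B sorts the flattened list once and scans adjacent runs instead of A's set() pass with repeated count scans (faster).

-- ===== PORT A =====
def remove_common_string (smallest_process : List String) (process_list : List (List String)) (process_count : Int) : List String :=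
  let flat_list := process_list.flatMap (fun i => i)
  let remove_list : List String :=
    if process_count ≠ 1 then
      -- 'for i in set(flat_list)': result only used for membership, so iteration order is immaterial
      (PySem.Set.ofList flat_list).foldl
        (fun acc i => if ((flat_list.count i : Int) == process_count) then acc ++ [i] else acc) []
    else []
  process_list.map (fun i => PySem.Str.join ":" (i.filter (fun ii => !(remove_list.contains ii))))

-- ===== PORT B =====
-- Source B's outer while-loop over the sorted list: the inner while counts the run of
-- elements equal to flat[i] (j - i = 1 + length of the takeWhile prefix of the tail),
-- then i jumps to j (= dropWhile).
def pvRunScan (pc : Int) : List String → PySem.Set String → PySem.Set String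
  | [], acc => acc
  | x :: rest, acc =>
      pvRunScan pc (rest.dropWhile (fun y => y == x))
        (if (((rest.takeWhile (fun y => y == x)).length : Int) + 1 == pc) then PySem.Set.add acc x else acc)
  termination_by l _ => l.length
  decreasing_by
    simp only [List.length_cons]
    exact Nat.lt_succ_of_le (List.length_dropWhile_le _ _)

def remove_common_string_alt (smallest_process : List String) (process_list : List (List String)) (process_count : Int) : List String :=
  let flat := PySem.List.sorted (process_list.flatMap (fun sub => sub)) (fun s => s) false
  let remove : PySem.Set String :=
    if process_count ≠ 1 then pvRunScan process_count flat PySem.Set.empty else PySem.Set.empty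
  process_list.map (fun sub => PySem.Str.join ":" (sub.filter (fun s => !(remove.contains s))))

-- ===== PRECONDITION & SPEC =====
def Spec_remove_common_string (smallest_process : List String) (process_list : List (List String)) (process_count : Int) (out : List String) : Prop := out = remove_common_string_alt smallest_process process_list process_count
instance (smallest_process : List String) (process_list : List (List String)) (process_count : Int) (out : List String) : Decidable (Spec_remove_common_string smallest_process process_list process_count out) := by unfold Spec_remove_common_string; infer_instance

-- ===== CLAIM (what is proved, stated in full; the proofs are below) =====
def Claim_equal_remove_common_string : Prop := ∀ (smallest_process : List String) (process_list : List (List String)) (process_count : Int), Dom_remove_common_string smallest_process process_list process_count → Spec_remove_common_string smallest_process process_list process_count (remove_common_string smallest_process process_list process_count)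

-- ===== LEMMAS AND PROOFS =====

-- In a sorted tail whose elements all dominate x, the occurrences of x are exactly the
-- leading run: count = takeWhile length, and x does not survive the dropWhile.
theorem pv_count_take_drop (x : String) (rest : List String)
    (hs : ∀ a ∈ rest, x ≤ a) (hp : rest.Pairwise (fun a b => a ≤ b)) :
    rest.count x = (rest.takeWhile (fun y => y == x)).length ∧
      x ∉ rest.dropWhile (fun y => y == x) := by
  induction rest with
  | nil => simp
  | cons a t ih =>
    by_cases h : a = x
    · subst h
      have ih' := ih (fun b hb => hs b (List.mem_cons_of_mem _ hb)) hp.of_cons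
      simp only [List.takeWhile_cons, List.dropWhile_cons, beq_self_eq_true, if_pos]
      simp only [List.count_cons_self, List.length_cons]
      exact ⟨by rw [ih'.1], ih'.2⟩
    · have hbx : (a == x) = false := beq_eq_false_iff_ne.mpr h
      have hxa : x < a := lt_of_le_of_ne (hs a List.mem_cons_self) (fun he => h he.symm)
      have hnm : x ∉ a :: t := by
        intro hm
        rcases List.mem_cons.mp hm with he | hm
        · exact h he.symm
        · exact absurd ((List.pairwise_cons.mp hp).1 x hm) (not_le.mpr hxa)
      simp [hbx, List.count_eq_zero.mpr hnm, hnm]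

-- For y ≠ x, dropping the leading x-run changes neither y's count nor y's membership.
theorem pv_drop_other (y x : String) (rest : List String) (hne : y ≠ x) :
    rest.count y = (rest.dropWhile (fun z => z == x)).count y ∧
      (y ∈ rest ↔ y ∈ rest.dropWhile (fun z => z == x)) := by
  have hsplit : rest = rest.takeWhile (fun z => z == x) ++ rest.dropWhile (fun z => z == x) :=
    (List.takeWhile_append_dropWhile).symm
  have hnt : y ∉ rest.takeWhile (fun z => z == x) := by
    intro hm
    have := List.mem_takeWhile_imp hm
    exact hne (by simpa using this)
  constructor
  · conv_lhs => rw [hsplit]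
    rw [List.count_append, List.count_eq_zero.mpr hnt, Nat.zero_add]
  · constructor
    · intro hm
      rcases List.mem_append.mp (hsplit ▸ hm) with h1 | h2
      · exact absurd h1 hnt
      · exact h2
    · intro hm
      rw [hsplit]
      exact List.mem_append.mpr (Or.inr hm)

-- Membership in the run-scan of a sorted list: a value is collected iff its total
-- count equals pc (or it was already in the accumulator).
theorem pvRunScan_mem (pc : Int) : ∀ (n : Nat) (l : List String), l.length ≤ n →
    l.Pairwise (fun a b => a ≤ b) → ∀ (acc : PySem.Set String) (x : String),
    (x ∈ pvRunScan pc l acc ↔ x ∈ acc ∨ (x ∈ l ∧ ((l.count x : Int) = pc))) := by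
  intro n
  induction n with
  | zero =>
    intro l hl _ acc x
    have : l = [] := List.eq_nil_of_length_eq_zero (Nat.le_zero.mp hl)
    subst this; simp [pvRunScan]
  | succ m ih =>
    intro l hl hp acc x
    cases l with
    | nil => simp [pvRunScan]
    | cons x0 rest =>
      have hs : ∀ a ∈ rest, x0 ≤ a := (List.pairwise_cons.mp hp).1
      have hpt : rest.Pairwise (fun a b => a ≤ b) := hp.of_cons
      have hctd := pv_count_take_drop x0 rest hs hpt
      have hlen : (rest.dropWhile (fun y => y == x0)).length ≤ m := by
        have h1 := List.length_dropWhile_le (fun y => y == x0) rest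
        simp only [List.length_cons] at hl; omega
      have hpd : (rest.dropWhile (fun y => y == x0)).Pairwise (fun a b => a ≤ b) :=
        hpt.sublist (List.dropWhile_sublist _)
      rw [pvRunScan]
      rw [ih _ hlen hpd]
      by_cases hx : x = x0
      · subst hx
        have hnotd : x ∉ rest.dropWhile (fun y => y == x) := hctd.2
        have hcnt : ((x :: rest).count x : Int) = ((rest.takeWhile (fun y => y == x)).length : Int) + 1 := by
          rw [List.count_cons_self, hctd.1]; push_cast; ring
        constructor
        · intro hmem
          rcases hmem with hacc | ⟨hmem, _⟩
          · by_cases hc : (((rest.takeWhile (fun y => y == x)).length : Int) + 1 = pc)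
            · right; exact ⟨List.mem_cons_self, by rw [hcnt]; exact hc⟩
            · left; simpa [hc] using hacc
          · exact absurd hmem hnotd
        · intro hmem
          rcases hmem with hacc | ⟨_, hcnt'⟩
          · left
            by_cases hc : (((rest.takeWhile (fun y => y == x)).length : Int) + 1 = pc)
            · simp [hc, PySem.Set.mem_add]
            · simpa [hc] using hacc
          · left
            have hc : (((rest.takeWhile (fun y => y == x)).length : Int) + 1 = pc) := by
              rw [← hcnt]; exact hcnt'
            simp [hc, PySem.Set.mem_add]
      · have hdo := pv_drop_other x x0 rest hx
        have haccx : ∀ s : PySem.Set String,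
            (x ∈ (if (((rest.takeWhile (fun y => y == x0)).length : Int) + 1 == pc)
                  then PySem.Set.add s x0 else s) ↔ x ∈ s) := by
          intro s
          split
          · rw [PySem.Set.mem_add]; simp [hx]
          · exact Iff.rfl
        rw [haccx]
        have hb0 : (x0 == x) = false := beq_eq_false_iff_ne.mpr (Ne.symm hx)
        have hcx : (x0 :: rest).count x = (rest.dropWhile (fun y => y == x0)).count x := by
          simp [List.count_cons, hb0, hdo.1]
        have hmx : x ∈ x0 :: rest ↔ x ∈ rest.dropWhile (fun y => y == x0) := by
          rw [List.mem_cons]; simp [hx]; exact hdo.2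
        rw [← hcx, ← hmx]

-- A's remove_list is the filter of the dedup'd flat list by the count test.
theorem pv_removeA_eq (flat : List String) (pc : Int) :
    (PySem.Set.ofList flat).foldl
        (fun acc i => if ((flat.count i : Int) == pc) then acc ++ [i] else acc) []
      = (PySem.Set.ofList flat).filter (fun i => ((flat.count i : Int) == pc)) := by
  rw [PySem.List.foldl_append_if_eq_filter]
  simp

-- ===== VERDICT (by name: the statement is the Claim_ definition above) =====
theorem remove_common_string_spec : Claim_equal_remove_common_string := by
  intro sp pl pc _
  unfold Spec_remove_common_string remove_common_string remove_common_string_alt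
  dsimp only
  set flat0 := pl.flatMap (fun i => i) with hflat0
  set flatS := PySem.List.sorted flat0 (fun s => s) false with hflatS
  have hperm : flatS.Perm flat0 := PySem.List.sorted_perm _ _ _
  have hpw : flatS.Pairwise (fun a b => a ≤ b) := PySem.List.sorted_pairwise _ _
  -- membership in the two remove collections coincides
  have hmem : ∀ s : String,
      (s ∈ (if pc ≠ 1 then
              (PySem.Set.ofList flat0).foldl
                (fun acc i => if ((flat0.count i : Int) == pc) then acc ++ [i] else acc) []
            else []))
      ↔ (s ∈ (if pc ≠ 1 then pvRunScan pc flatS PySem.Set.empty else PySem.Set.empty)) := by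
    intro s
    by_cases h1 : pc ≠ 1
    · simp only [if_pos h1]
      rw [pv_removeA_eq, List.mem_filter,
        pvRunScan_mem pc flatS.length flatS le_rfl hpw PySem.Set.empty s]
      rw [PySem.Set.mem_ofList, hperm.count_eq, hperm.mem_iff]
      simp [PySem.Set.empty]
    · simp only [if_neg h1]
      simp [PySem.Set.empty]
  -- hence the Bool-valued contains agree, and the outputs are equal
  apply List.map_congr_left
  intro sub _
  congr 1
  apply List.filter_congr
  intro s _
  have := hmem s
  simp only [PySem.Set.contains, List.contains_eq_mem]
  rw [decide_eq_decide.mpr this]
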